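-- pv_equiv track=rewrite | github.com/pranavraj575/coevolution | experiments/pyquaticus_utils/dist_plot.py | deorder_total_dist
-- ===== SOURCE A (Python) =====
-- def deorder_total_dist(total_dist):
--     total_dist_non_ordered = dict()
--     for item in total_dist:
--         key = tuple(sorted(item))
--         if key not in total_dist_non_ordered:
--             total_dist_non_ordered[key] = 0
--         total_dist_non_ordered[key] += total_dist[item]
--     return total_dist_non_ordered
-- ===== SOURCE B (Python) =====
-- def deorder_total_dist(total_dist):
--     # group-by decomposition: normalize all keys once, list the distinct
--     # normalized keys in first-occurrence order, then sum each group directly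
--     norm = [tuple(sorted(item)) for item in total_dist]
--     keys = []
--     for k in norm:
--         if k not in keys:
--             keys.append(k)
--     return {k: sum(v for nk, v in zip(norm, total_dist.values()) if nk == k)
--             for k in keys}
-- ===== Notes on version B (the rewrite author's own statement) =====
-- stated objective: alternative
-- what changed: Replaces A's single-pass hash accumulation into a dict with a group-by decomposition: normalize all keys once, collect the distinct normalized keys in first-occurrence order, then compute each group's sum by a direct scan in a dict comprehension.
import Mathlib
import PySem

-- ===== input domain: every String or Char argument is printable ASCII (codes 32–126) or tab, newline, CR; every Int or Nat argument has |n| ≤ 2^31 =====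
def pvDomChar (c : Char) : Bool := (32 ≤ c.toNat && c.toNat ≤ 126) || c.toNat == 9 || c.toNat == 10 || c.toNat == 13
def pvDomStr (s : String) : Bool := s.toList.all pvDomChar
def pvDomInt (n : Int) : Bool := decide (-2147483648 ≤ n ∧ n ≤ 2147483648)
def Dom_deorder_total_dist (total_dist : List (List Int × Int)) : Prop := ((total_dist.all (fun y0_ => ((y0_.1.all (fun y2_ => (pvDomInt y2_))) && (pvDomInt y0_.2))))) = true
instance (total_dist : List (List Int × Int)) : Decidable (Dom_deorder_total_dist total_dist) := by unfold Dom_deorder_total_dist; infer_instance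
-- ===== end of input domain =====

-- B replaces A's single-pass dict accumulation by a group-by decomposition
-- (normalize keys once, dedup in first-occurrence order, sum each group by a
-- direct scan); objective: alternative, same results.


-- ===== PORT A =====
-- for item in total_dist: key = tuple(sorted(item)); setdefault 0; += total_dist[item]
-- 'total_dist[item]' is a lookup in the input dict itself; item is one of its keys, so it
-- never raises; under Pre_ (distinct keys) getD with default 0 returns exactly that value.
def deorder_total_dist (total_dist : List (List Int × Int)) : List (List Int × Int) :=
  (total_dist.foldl
    (fun d p =>
      let key := PySem.List.sorted p.1 (fun x => x) false
      let d := if d.contains key then d else d.insert key 0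
      d.modify key 0 (· + (PySem.Dict.mk total_dist).getD p.1 0))
    PySem.Dict.empty).items

-- ===== PORT B =====
def deorder_total_dist_alt (total_dist : List (List Int × Int)) : List (List Int × Int) :=
  let norm := total_dist.map (fun p => PySem.List.sorted p.1 (fun x => x) false)
  let keys : PySem.Set (List Int) := PySem.Set.ofList norm
  keys.map (fun k =>
    (k, (((norm.zip (total_dist.map (fun p => p.2))).filter
            (fun q => q.1 == k)).map (fun q => q.2)).sum))

-- ===== PRECONDITION & SPEC =====
-- Pre_ excludes association lists with duplicate keys: they do not represent a Python dict
-- (Python collapses the duplicates before A ever runs), so A's behaviour there is an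
-- artefact of the encoding.
def Pre_deorder_total_dist (total_dist : List (List Int × Int)) : Prop :=
  (total_dist.map (fun p => p.1)).Nodup
instance (total_dist : List (List Int × Int)) : Decidable (Pre_deorder_total_dist total_dist) := by
  unfold Pre_deorder_total_dist; infer_instance

def pvWitness_deorder_total_dist : (List (List Int × Int)) := [([1, 2], 3), ([2, 1], 4)]

def Spec_deorder_total_dist (total_dist : List (List Int × Int)) (out : List (List Int × Int)) : Prop := out = deorder_total_dist_alt total_dist
instance (total_dist : List (List Int × Int)) (out : List (List Int × Int)) : Decidable (Spec_deorder_total_dist total_dist out) := by unfold Spec_deorder_total_dist; infer_instance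

-- ===== CLAIM (what is proved, stated in full; the proofs are below) =====
def Claim_equal_deorder_total_dist : Prop := ∀ (total_dist : List (List Int × Int)), Dom_deorder_total_dist total_dist → Pre_deorder_total_dist total_dist → Spec_deorder_total_dist total_dist (deorder_total_dist total_dist)

-- ===== LEMMAS AND PROOFS =====

-- the normalized key and the generic accumulation step of A's loop
def pvKey (p : List Int × Int) : List Int := PySem.List.sorted p.1 (fun x => x) false

def pvStep (val : List Int × Int → Int) (d : PySem.Dict (List Int) Int)
    (p : List Int × Int) : PySem.Dict (List Int) Int :=
  (if d.contains (pvKey p) then d else d.insert (pvKey p) 0).modify (pvKey p) 0 (· + val p)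

lemma pvStep_keys (val : List Int × Int → Int) (d : PySem.Dict (List Int) Int)
    (p : List Int × Int) : (pvStep val d p).keys = PySem.Set.add d.keys (pvKey p) := by
  unfold pvStep PySem.Set.add
  by_cases h : d.contains (pvKey p) = true
  · have hm : (pvKey p) ∈ d.keys := (PySem.Dict.contains_iff_mem_keys d _).1 h
    rw [if_pos h, PySem.Dict.keys_modify, PySem.Dict.keys_insert_of_contains _ _ h]
    simp [hm]
  · have hf : d.contains (pvKey p) = false := by simp [h]
    have hm : ¬ (pvKey p) ∈ d.keys := fun hm => h ((PySem.Dict.contains_iff_mem_keys d _).2 hm)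
    rw [if_neg h, PySem.Dict.keys_modify,
        PySem.Dict.keys_insert_of_contains _ _ (PySem.Dict.contains_insert_self _ _ _),
        PySem.Dict.keys_insert_of_not_contains _ _ hf]
    simp [hm]

lemma pvStep_getD (val : List Int × Int → Int) (d : PySem.Dict (List Int) Int)
    (p : List Int × Int) (k : List Int) :
    (pvStep val d p).getD k 0 =
      if k = pvKey p then d.getD (pvKey p) 0 + val p else d.getD k 0 := by
  unfold pvStep
  rw [PySem.Dict.getD_modify]
  by_cases h : d.contains (pvKey p) = true
  · simp [h]
  · have hf : d.contains (pvKey p) = false := by simp [h]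
    rw [if_neg h]
    by_cases hk : k = pvKey p
    · rw [if_pos hk, if_pos hk, PySem.Dict.getD_insert_self,
          PySem.Dict.getD_of_not_contains d 0 hf]
    · rw [if_neg hk, if_neg hk, PySem.Dict.getD_insert_of_ne d _ _ hk]

lemma pvFold_keys (val : List Int × Int → Int) (l : List (List Int × Int))
    (d : PySem.Dict (List Int) Int) :
    (l.foldl (pvStep val) d).keys = PySem.Set.update d.keys (l.map pvKey) := by
  induction l generalizing d with
  | nil => rfl
  | cons p l ih =>
      rw [List.foldl_cons, ih, pvStep_keys]
      rfl

lemma pvFold_getD (val : List Int × Int → Int) (l : List (List Int × Int))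
    (d : PySem.Dict (List Int) Int) (k : List Int) :
    (l.foldl (pvStep val) d).getD k 0 =
      d.getD k 0 + ((l.filter (fun p => pvKey p == k)).map val).sum := by
  induction l generalizing d with
  | nil => simp
  | cons p l ih =>
      rw [List.foldl_cons, ih, pvStep_getD, List.filter_cons]
      by_cases hk : k = pvKey p
      · simp [hk, List.sum_cons]; ring
      · have : (pvKey p == k) = false := by simp [Ne.symm hk]
        simp [hk, this]

-- ===== VERDICT (by name: the statement is the Claim_ definition above) =====
theorem deorder_total_dist_spec : Claim_equal_deorder_total_dist := by
  intro l _ hpre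
  have hpre' : (l.map (fun p => p.1)).Nodup := hpre
  unfold Spec_deorder_total_dist deorder_total_dist deorder_total_dist_alt
  show (l.foldl (pvStep (fun p => (PySem.Dict.mk l).getD p.1 0)) PySem.Dict.empty).items = _
  have hkeys : (l.foldl (pvStep (fun p => (PySem.Dict.mk l).getD p.1 0)) PySem.Dict.empty).keys
      = PySem.Set.ofList (l.map pvKey) := by
    rw [pvFold_keys, PySem.Dict.keys_empty, PySem.Set.ofList_eq_foldl]; rfl
  rw [PySem.Dict.items_eq_map_keys _ (by rw [hkeys]; exact PySem.Set.nodup_ofList _) 0, hkeys]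
  simp only [List.zip_map', List.filter_map, List.map_map]
  apply List.map_congr_left
  intro k hk
  rw [pvFold_getD]
  have hval : ∀ p ∈ l.filter (fun p => pvKey p == k), (PySem.Dict.mk l).getD p.1 0 = p.2 := by
    intro p hp
    have hpl : p ∈ l := List.mem_of_mem_filter hp
    exact PySem.Dict.getD_of_mem_items _ (by exact hpl) (by simpa [PySem.Dict.keys_mk] using hpre') 0
  rw [List.map_congr_left hval]
  simp [Function.comp_def, pvKey, PySem.Dict.getD_empty]
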